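-- pv_equiv track=rewrite | github.com/miliar/Code_Jam_Webscraper | solutions_python/Problem_201/1099.py | solve
-- ===== SOURCE A (Python) =====
-- from collections import Counter
--
-- def solve(n, k):
--     d = Counter([n])
--     for i in range(k):
--         a = n // 2
--         b = (n - 1) // 2
--         if a == 0:
--             break
--         d[a] += 1
--         d[b] += 1
--         d[n] -= 1
--         if d[n] == 0:
--             del d[n]
--             n = max(d)
--     return a, b
-- ===== SOURCE B (Python) =====
-- def solve(n, k):
--     # Level-by-level counting: at every level the piles take at most two sizes
--     # (big and big-1); locate the k-th split arithmetically per level.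
--     big, cb, cs = n, 1, 0       # cb piles of size big, cs piles of size big-1
--     while big >= 2:
--         if k <= cb:
--             return big // 2, (big - 1) // 2
--         if big - 1 >= 2 and k <= cb + cs:
--             return (big - 1) // 2, (big - 2) // 2
--         k -= cb + (cs if big - 1 >= 2 else 0)
--         if big % 2 == 1:
--             big, cb, cs = big // 2, 2 * cb + cs, cs
--         else:
--             big, cb, cs = big // 2, cb, cb + 2 * cs
--     return 0, 0
-- ===== Notes on version B (the rewrite author's own statement) =====
-- stated objective: faster
-- what changed: Replaces the per-split Counter simulation (one max-pile split per iteration, O(k) iterations) by level-by-level counting: at each halving level the piles take at most two sizes big/big-1, so B tracks just (big, count_big, count_small) and locates the k-th split arithmetically in O(log n) iterations.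
-- outside the precondition, e.g. on solve(0, 1): A returns (0, -1), B returns (0, 0); on solve(-5, 3): A returns (-2, -2), B returns (0, 0)
import Mathlib
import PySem

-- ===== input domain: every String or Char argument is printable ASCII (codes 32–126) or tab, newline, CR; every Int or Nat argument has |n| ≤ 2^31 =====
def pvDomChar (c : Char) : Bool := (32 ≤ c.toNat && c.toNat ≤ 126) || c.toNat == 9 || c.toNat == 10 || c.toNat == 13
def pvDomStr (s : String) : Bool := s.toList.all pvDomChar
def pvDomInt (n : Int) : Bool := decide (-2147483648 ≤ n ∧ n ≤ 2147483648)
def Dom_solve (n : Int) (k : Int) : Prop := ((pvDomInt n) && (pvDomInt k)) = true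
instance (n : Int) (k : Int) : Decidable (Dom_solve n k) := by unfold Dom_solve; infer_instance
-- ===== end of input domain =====

-- B replaces A's one-split-per-iteration Counter simulation by level-by-level pile counting
-- (at most two pile sizes per halving level), locating the k-th split arithmetically.

-- ===== PORT A =====
-- loop state: remaining fuel (= remaining range(k) iterations), dict d, current n, last a, b
def solveLoopA : Nat → PySem.Dict Int Int → Int → Int → Int → List Int
  | 0, _, _, a, b => [a, b]
  | fuel+1, d, n, _, _ =>
    let a := PySem.Int.floordiv n 2
    let b := PySem.Int.floordiv (n-1) 2
    if a = 0 then [a, b]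
    else
      let d1 := d.insert a (d.getD a 0 + 1)
      let d2 := d1.insert b (d1.getD b 0 + 1)
      let d3 := d2.insert n (d2.getD n 0 - 1)
      if d3.getD n 0 = 0 then
        let d4 := d3.erase n
        -- max(d) over the dict's keys; the dict is never empty when this runs (key a was just added)
        let n' := (PySem.List.max? d4.keys (fun x => x)).getD 0
        solveLoopA fuel d4 n' a b
      else solveLoopA fuel d3 n a b

def solve (n : Int) (k : Int) : List Int :=
  solveLoopA k.toNat (PySem.Dict.counter [n]) n 0 0

-- ===== PORT B =====
-- termination of B's level loop: the big pile size halves each iteration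
theorem pvHalfLt (big : Int) (h : 2 ≤ big) :
    (PySem.Int.floordiv big 2).toNat < big.toNat := by
  rw [PySem.Int.floordiv_eq_ediv_of_pos (by omega)]
  omega

-- while-loop state (big, cb, cs, k): cb piles of size big, cs piles of size big-1
def solveLoopB (big cb cs k : Int) : List Int :=
  if h : 2 ≤ big then
    if k ≤ cb then [PySem.Int.floordiv big 2, PySem.Int.floordiv (big-1) 2]
    else if 2 ≤ big - 1 ∧ k ≤ cb + cs then
      [PySem.Int.floordiv (big-1) 2, PySem.Int.floordiv (big-2) 2]
    else
      let k' := k - (cb + if 2 ≤ big - 1 then cs else 0)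
      if PySem.Int.mod big 2 = 1 then
        solveLoopB (PySem.Int.floordiv big 2) (2*cb + cs) cs k'
      else
        solveLoopB (PySem.Int.floordiv big 2) cb (cb + 2*cs) k'
  else [0, 0]
termination_by big.toNat
decreasing_by
  all_goals exact pvHalfLt big h

def solve_alt (n : Int) (k : Int) : List Int := solveLoopB n 1 0 k

-- ===== PRECONDITION & SPEC =====
-- Pre_ excludes k ≤ 0, on which A raises NameError ('a' is never assigned), and n ≤ 0,
-- outside the problem's natural domain of stall counts, where A's negative floor-division
-- splits return accidental values B's algorithm has no notion of.
def Pre_solve (n : Int) (k : Int) : Prop := 1 ≤ n ∧ 1 ≤ k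
instance (n : Int) (k : Int) : Decidable (Pre_solve n k) := by unfold Pre_solve; infer_instance
def pvWitness_solve : Int × Int := (9, 4)

def Spec_solve (n : Int) (k : Int) (out : List Int) : Prop := out = solve_alt n k
instance (n : Int) (k : Int) (out : List Int) : Decidable (Spec_solve n k out) := by unfold Spec_solve; infer_instance

-- ===== CLAIM (what is proved, stated in full; the proofs are below) =====
def Claim_equal_solve : Prop := ∀ (n : Int) (k : Int), Dom_solve n k → Pre_solve n k → Spec_solve n k (solve n k)

-- ===== LEMMAS AND PROOFS =====

-- multiplicity of a pile size in A's Counter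
def cnt (d : PySem.Dict Int Int) (x : Int) : Int := d.getD x 0

-- support of the dict agrees with positive multiplicity (A deletes keys that reach 0)
def Supp (d : PySem.Dict Int Int) : Prop := ∀ x, x ∈ d.keys ↔ 1 ≤ cnt d x

-- the invariant tying A's Counter to B's level state (cb piles of size S, cs of size S-1)
def LevelInv (d : PySem.Dict Int Int) (S cb cs : Int) : Prop :=
  Supp d ∧ (∀ x ∈ d.keys, x ≤ S) ∧ (∀ x, 0 ≤ cnt d x) ∧
  cnt d S = cb ∧ 1 ≤ cb ∧ (2 ≤ S - 1 → cnt d (S-1) = cs) ∧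
  (∀ x, 2 ≤ x → x ≠ S → x ≠ S - 1 → cnt d x = 0)

-- the dict update one iteration of A's loop performs (d[a]+=1; d[b]+=1; d[n]-=1)
def stepD (d : PySem.Dict Int Int) (n : Int) : PySem.Dict Int Int :=
  let a := PySem.Int.floordiv n 2
  let b := PySem.Int.floordiv (n-1) 2
  let d1 := d.insert a (d.getD a 0 + 1)
  let d2 := d1.insert b (d1.getD b 0 + 1)
  d2.insert n (d2.getD n 0 - 1)

theorem find?_filter_ne (l : List (Int × Int)) (k x : Int) (hxk : x ≠ k) :
    List.find? (fun p => p.1 == x) (l.filter (fun p => !(p.1 == k))) =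
    List.find? (fun p => p.1 == x) l := by
  induction l with
  | nil => rfl
  | cons p t ih =>
    by_cases hpk : p.1 = k
    · have hpx : p.1 ≠ x := by rw [hpk]; exact fun h => hxk h.symm
      simp [List.filter_cons, List.find?_cons, hpk, hpx, Ne.symm hxk, ih]
    · by_cases hpx : p.1 = x
      · simp [List.filter_cons, List.find?_cons, hpk, hpx, hxk]
      · simp [List.filter_cons, List.find?_cons, hpk, hpx, hxk, ih]

theorem getD_erase (d : PySem.Dict Int Int) (k x dflt : Int) :
    (d.erase k).getD x dflt = if x = k then dflt else d.getD x dflt := by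
  by_cases hxk : x = k
  · subst hxk
    simp only [PySem.Dict.getD, PySem.Dict.get?, PySem.Dict.erase, if_pos rfl]
    rw [List.find?_eq_none.mpr]
    · rfl
    · intro p hp
      have h2 := (List.mem_filter.mp hp).2
      simp only [Bool.not_eq_true', beq_eq_false_iff_ne, ne_eq] at h2
      simp [h2]
  · simp only [PySem.Dict.getD, PySem.Dict.get?, PySem.Dict.erase, if_neg hxk]
    rw [find?_filter_ne _ _ _ hxk]

theorem cnt_erase (d : PySem.Dict Int Int) (k x : Int) :
    cnt (d.erase k) x = if x = k then 0 else cnt d x := by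
  simp only [cnt]
  rw [getD_erase]

theorem mem_keys_erase (d : PySem.Dict Int Int) (k x : Int) :
    x ∈ (d.erase k).keys ↔ x ∈ d.keys ∧ x ≠ k := by
  simp only [PySem.Dict.erase, PySem.Dict.keys, List.mem_map, List.mem_filter,
    Bool.not_eq_true', beq_eq_false_iff_ne, ne_eq]
  constructor
  · rintro ⟨p, ⟨hp, hk⟩, rfl⟩
    exact ⟨⟨p, hp, rfl⟩, hk⟩
  · rintro ⟨⟨p, hp, rfl⟩, hk⟩
    exact ⟨p, ⟨hp, hk⟩, rfl⟩

theorem max_getD_eq (l : List Int) (m : Int) (hm : m ∈ l) (hmax : ∀ x ∈ l, x ≤ m) :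
    (PySem.List.max? l (fun x => x)).getD 0 = m := by
  cases h : PySem.List.max? l (fun x => x) with
  | none =>
    rw [PySem.List.max?_eq_none_iff] at h
    subst h; cases hm
  | some m' =>
    have h1 := PySem.List.max?_mem h
    have h2 := PySem.List.max?_isMax h m hm
    have h3 := hmax m' h1
    simp only [Option.getD_some]
    omega

theorem cnt_stepD (d : PySem.Dict Int Int) (S : Int) (hS : 2 ≤ S) (x : Int) :
    cnt (stepD d S) x = cnt d x + (if x = PySem.Int.floordiv S 2 then 1 else 0)
      + (if x = PySem.Int.floordiv (S-1) 2 then 1 else 0) - (if x = S then 1 else 0) := by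
  have h2 : PySem.Int.floordiv S 2 = S / 2 :=
    PySem.Int.floordiv_eq_ediv_of_pos (by norm_num)
  have hb2 : PySem.Int.floordiv (S-1) 2 = (S-1) / 2 :=
    PySem.Int.floordiv_eq_ediv_of_pos (by norm_num)
  simp only [cnt, stepD, PySem.Dict.getD_insert]
  by_cases hxS : x = S
  · subst hxS
    simp only [h2, hb2]
    split_ifs <;> omega
  · simp only [if_neg hxS]
    by_cases hxb : x = PySem.Int.floordiv (S-1) 2
    · subst hxb
      by_cases hba : PySem.Int.floordiv (S-1) 2 = PySem.Int.floordiv S 2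
      · rw [hba]
        simp only [h2]
        split_ifs <;> omega
      · simp only [h2, hb2] at hba ⊢
        split_ifs <;> omega
    · simp only [if_neg hxb]
      by_cases hxa : x = PySem.Int.floordiv S 2
      · subst hxa
        simp only [h2, hb2] at hxb ⊢
        split_ifs <;> omega
      · simp only [if_neg hxa]
        simp only [h2, hb2] at hxa hxb ⊢
        omega

theorem mem_keys_stepD (d : PySem.Dict Int Int) (S x : Int) :
    x ∈ (stepD d S).keys ↔
      x = S ∨ x = PySem.Int.floordiv S 2 ∨ x = PySem.Int.floordiv (S-1) 2 ∨ x ∈ d.keys := by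
  simp only [stepD, PySem.Dict.mem_keys_insert]
  tauto

theorem supp_stepD (d : PySem.Dict Int Int) (S : Int) (hS : 2 ≤ S)
    (hsupp : Supp d) (hpos : ∀ x, 0 ≤ cnt d x) (x : Int) (hx : x ≠ S) :
    x ∈ (stepD d S).keys ↔ 1 ≤ cnt (stepD d S) x := by
  have hc := cnt_stepD d S hS x
  rw [mem_keys_stepD]
  have hp := hpos x
  by_cases ha : x = PySem.Int.floordiv S 2
  · constructor
    · intro _
      rw [if_pos ha, if_neg hx] at hc
      split_ifs at hc <;> omega
    · intro _; tauto
  · by_cases hb : x = PySem.Int.floordiv (S-1) 2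
    · constructor
      · intro _
        rw [if_neg ha, if_pos hb, if_neg hx] at hc
        omega
      · intro _; tauto
    · rw [if_neg ha, if_neg hb, if_neg hx] at hc
      constructor
      · rintro (h | h | h | h)
        · exact absurd h hx
        · exact absurd h ha
        · exact absurd h hb
        · have := (hsupp x).mp h; omega
      · intro h
        exact Or.inr (Or.inr (Or.inr ((hsupp x).mpr (by omega))))

theorem solveLoopA_succ (f : Nat) (d : PySem.Dict Int Int) (n a0 b0 : Int)
    (hn : ¬ PySem.Int.floordiv n 2 = 0) :
    solveLoopA (f+1) d n a0 b0 =
      if (stepD d n).getD n 0 = 0 then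
        solveLoopA f ((stepD d n).erase n)
          ((PySem.List.max? ((stepD d n).erase n).keys (fun x => x)).getD 0)
          (PySem.Int.floordiv n 2) (PySem.Int.floordiv (n-1) 2)
      else solveLoopA f (stepD d n) n (PySem.Int.floordiv n 2) (PySem.Int.floordiv (n-1) 2) := by
  simp only [solveLoopA, stepD]
  rw [if_neg hn]

theorem consumeA (j : Nat) (d : PySem.Dict Int Int) (S a0 b0 : Int)
    (hj : 1 ≤ j) (hle : (j : Int) ≤ cnt d S) (hS : 2 ≤ S) :
    solveLoopA j d S a0 b0 = [PySem.Int.floordiv S 2, PySem.Int.floordiv (S-1) 2] := by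
  induction j generalizing d a0 b0 with
  | zero => omega
  | succ j' ih =>
    have h2 : PySem.Int.floordiv S 2 = S / 2 :=
      PySem.Int.floordiv_eq_ediv_of_pos (by norm_num)
    have hb2 : PySem.Int.floordiv (S-1) 2 = (S-1) / 2 :=
      PySem.Int.floordiv_eq_ediv_of_pos (by norm_num)
    have hane : ¬ PySem.Int.floordiv S 2 = 0 := by rw [h2]; omega
    rw [solveLoopA_succ j' d S a0 b0 hane]
    have hcS := cnt_stepD d S hS S
    have hnea : S ≠ PySem.Int.floordiv S 2 := by rw [h2]; omega
    have hneb : S ≠ PySem.Int.floordiv (S-1) 2 := by rw [hb2]; omega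
    rw [if_neg hnea, if_neg hneb, if_pos rfl] at hcS
    by_cases hz : (stepD d S).getD S 0 = 0
    · rw [if_pos hz]
      have hz' : cnt (stepD d S) S = 0 := hz
      have hj0 : j' = 0 := by push_cast at hle; omega
      subst hj0; rfl
    · rw [if_neg hz]
      rcases Nat.eq_zero_or_pos j' with h0 | hpos
      · subst h0; rfl
      · refine ih (stepD d S) _ _ hpos ?_
        have hz' : cnt (stepD d S) S ≠ 0 := hz
        push_cast at hle ⊢
        omega

theorem breakA (fuel : Nat) (d : PySem.Dict Int Int) (a0 b0 : Int) (h : 1 ≤ fuel) :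
    solveLoopA fuel d 1 a0 b0 = [0, 0] := by
  obtain ⟨f, rfl⟩ : ∃ f, fuel = f + 1 := ⟨fuel - 1, by omega⟩
  have h1 : PySem.Int.floordiv (1:Int) 2 = 0 := by
    rw [PySem.Int.floordiv_eq_ediv_of_pos (by norm_num)]; decide
  have h0 : PySem.Int.floordiv ((1:Int)-1) 2 = 0 := by
    rw [PySem.Int.floordiv_eq_ediv_of_pos (by norm_num)]; decide
  simp only [solveLoopA, h1, h0]
  simp

set_option maxHeartbeats 1600000 in
theorem passA (t : Nat) (d : PySem.Dict Int Int) (S : Int) (fuel : Nat) (a0 b0 : Int)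
    (ht : cnt d S = t) (ht1 : 1 ≤ t) (hS : 2 ≤ S)
    (hsupp : Supp d) (hkeys : ∀ x ∈ d.keys, x ≤ S) (hpos : ∀ x, 0 ≤ cnt d x)
    (hfuel : t < fuel) :
    ∃ d', solveLoopA fuel d S a0 b0 =
        solveLoopA (fuel - t) d' ((PySem.List.max? d'.keys (fun x => x)).getD 0)
          (PySem.Int.floordiv S 2) (PySem.Int.floordiv (S-1) 2)
      ∧ (∀ x, cnt d' x = cnt d x + t * (if x = PySem.Int.floordiv S 2 then 1 else 0)
            + t * (if x = PySem.Int.floordiv (S-1) 2 then 1 else 0)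
            - t * (if x = S then 1 else 0))
      ∧ Supp d' ∧ (∀ x ∈ d'.keys, x ≤ S) ∧ (∀ x, 0 ≤ cnt d' x) ∧ cnt d' S = 0 := by
  induction t generalizing d fuel a0 b0 with
  | zero => omega
  | succ t' ih =>
    obtain ⟨f, rfl⟩ : ∃ f, fuel = f + 1 := ⟨fuel - 1, by omega⟩
    have h2 : PySem.Int.floordiv S 2 = S / 2 :=
      PySem.Int.floordiv_eq_ediv_of_pos (by norm_num)
    have hb2 : PySem.Int.floordiv (S-1) 2 = (S-1) / 2 :=
      PySem.Int.floordiv_eq_ediv_of_pos (by norm_num)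
    have hane : ¬ PySem.Int.floordiv S 2 = 0 := by rw [h2]; omega
    have hnea : S ≠ PySem.Int.floordiv S 2 := by rw [h2]; omega
    have hneb : S ≠ PySem.Int.floordiv (S-1) 2 := by rw [hb2]; omega
    have hcS := cnt_stepD d S hS S
    rw [if_neg hnea, if_neg hneb, if_pos rfl] at hcS
    rw [solveLoopA_succ f d S a0 b0 hane]
    by_cases hz : (stepD d S).getD S 0 = 0
    · -- the last copy of S was just split: t' = 0, delete S and recompute the max
      have hz' : cnt (stepD d S) S = 0 := hz
      have ht0 : t' = 0 := by push_cast at ht; omega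
      subst ht0
      rw [if_pos hz]
      refine ⟨(stepD d S).erase S, by norm_num, ?_, ?_, ?_, ?_, ?_⟩
      · intro x
        have hc := cnt_stepD d S hS x
        rw [cnt_erase]
        by_cases hxS : x = S
        · subst hxS
          simp only [if_pos rfl, if_neg hnea, if_neg hneb]
          push_cast
          omega
        · rw [if_neg hxS]
          rw [if_neg hxS] at hc ⊢
          push_cast
          split_ifs at hc ⊢ <;> omega
      · intro x
        rw [mem_keys_erase, cnt_erase]
        by_cases hxS : x = S
        · subst hxS; simp
        · rw [if_neg hxS]
          exact ⟨fun ⟨h, _⟩ => (supp_stepD d S hS hsupp hpos x hxS).mp h,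
                 fun h => ⟨(supp_stepD d S hS hsupp hpos x hxS).mpr h, hxS⟩⟩
      · intro x hx
        rcases (mem_keys_erase _ _ _).mp hx with ⟨hx1, _⟩
        rcases (mem_keys_stepD d S x).mp hx1 with h | h | h | h
        · omega
        · omega
        · omega
        · exact hkeys x h
      · intro x
        rw [cnt_erase]
        split_ifs with h
        · omega
        · have hc := cnt_stepD d S hS x
          have := hpos x
          rw [if_neg h] at hc
          split_ifs at hc <;> omega
      · rw [cnt_erase, if_pos rfl]
    · -- more copies of S remain: count went down by one, max is still S
      rw [if_neg hz]
      have hz' : cnt (stepD d S) S ≠ 0 := hz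
      have ht1' : 1 ≤ t' := by push_cast at ht; omega
      have hsupp' : Supp (stepD d S) := by
        intro x
        by_cases hxS : x = S
        · subst hxS
          constructor
          · intro _; omega
          · intro _; rw [mem_keys_stepD]; left; rfl
        · exact supp_stepD d S hS hsupp hpos x hxS
      have hkeys' : ∀ x ∈ (stepD d S).keys, x ≤ S := by
        intro x hx
        rcases (mem_keys_stepD d S x).mp hx with h | h | h | h
        · omega
        · omega
        · omega
        · exact hkeys x h
      have hpos' : ∀ x, 0 ≤ cnt (stepD d S) x := by
        intro x
        by_cases hxS : x = S
        · subst hxS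
          omega
        · have hc := cnt_stepD d S hS x
          rw [if_neg hxS] at hc
          have := hpos x
          split_ifs at hc <;> omega
      obtain ⟨d', heq, hcnt, hsupp'', hkeys'', hpos'', hzero''⟩ :=
        ih (stepD d S) f (PySem.Int.floordiv S 2) (PySem.Int.floordiv (S-1) 2)
          (by push_cast at ht ⊢; omega) ht1' hsupp' hkeys' hpos' (by omega)
      refine ⟨d', ?_, ?_, hsupp'', hkeys'', hpos'', hzero''⟩
      · rw [heq, Nat.succ_sub_succ]
      · intro x
        have hc1 := hcnt x
        have hc2 := cnt_stepD d S hS x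
        push_cast at hc1 ⊢
        split_ifs at hc1 hc2 ⊢ <;> omega

set_option maxHeartbeats 3200000 in
theorem mainA : ∀ (N : Nat) (S cb cs k : Int) (d : PySem.Dict Int Int) (a0 b0 : Int),
    S.toNat ≤ N → 2 ≤ S → 1 ≤ k → LevelInv d S cb cs →
    solveLoopA k.toNat d S a0 b0 = solveLoopB S cb cs k := by
  intro N
  induction N with
  | zero => intro S cb cs k d a0 b0 hN hS _ _; omega
  | succ N ih =>
    intro S cb cs k d a0 b0 hN hS hk hinv
    obtain ⟨hsupp, hkeys, hpos, hcbS, hcb1, hcsS, hjunk⟩ := hinv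
    have h2 : PySem.Int.floordiv S 2 = S / 2 :=
      PySem.Int.floordiv_eq_ediv_of_pos (by norm_num)
    have hb2 : PySem.Int.floordiv (S-1) 2 = (S-1) / 2 :=
      PySem.Int.floordiv_eq_ediv_of_pos (by norm_num)
    have hmod : PySem.Int.mod S 2 = S % 2 :=
      PySem.Int.mod_eq_emod_of_pos (by norm_num)
    rw [solveLoopB, dif_pos hS]
    by_cases hk1 : k ≤ cb
    · rw [if_pos hk1]
      exact consumeA k.toNat d S a0 b0 (by omega) (by rw [hcbS]; omega) hS
    · rw [if_neg hk1]
      obtain ⟨d', heq, hcnt', hsupp', hkeys', hpos', hzero'⟩ :=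
        passA cb.toNat d S k.toNat a0 b0 (by rw [hcbS]; omega) (by omega) hS
          hsupp hkeys hpos (by omega)
      rw [heq]
      have hcast : (cb.toNat : Int) = cb := by omega
      rw [hcast] at hcnt'
      have hkeysS1 : ∀ x ∈ d'.keys, x ≤ S - 1 := by
        intro x hx
        have hx1 := hkeys' x hx
        have hx2 := (hsupp' x).mp hx
        by_contra hcon
        have hxx : x = S := by omega
        subst hxx
        omega
      by_cases hbr : 2 ≤ S - 1 ∧ k ≤ cb + cs
      · rw [if_pos hbr]
        obtain ⟨hS3', hkcs⟩ := hbr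
        have hcsval : cnt d' (S-1) = cs := by
          have hc := hcnt' (S-1)
          have hne1 : S - 1 ≠ PySem.Int.floordiv S 2 := by rw [h2]; omega
          have hne2 : S - 1 ≠ PySem.Int.floordiv (S-1) 2 := by rw [hb2]; omega
          have hne3 : S - 1 ≠ S := by omega
          rw [if_neg hne1, if_neg hne2, if_neg hne3] at hc
          rw [hc, hcsS hS3']
          ring
        have hmax : (PySem.List.max? d'.keys (fun x => x)).getD 0 = S - 1 :=
          max_getD_eq _ _ ((hsupp' (S-1)).mpr (by omega)) hkeysS1
        rw [hmax]
        have hrw : S - 1 - 1 = S - 2 := by ring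
        have hfin := consumeA (k.toNat - cb.toNat) d' (S-1)
          (PySem.Int.floordiv S 2) (PySem.Int.floordiv (S-1) 2)
          (by omega) (by rw [hcsval]; omega) (by omega)
        rw [hrw] at hfin
        exact hfin
      · rw [if_neg hbr]
        have hc2 : PySem.Int.floordiv (S-2) 2 = (S-2) / 2 :=
          PySem.Int.floordiv_eq_ediv_of_pos (by norm_num)
        by_cases hSge3 : 2 ≤ S - 1
        · -- descend below level S: first finish the cs piles of size S-1 (if any)
          simp only [if_pos hSge3]
          have hkcs : ¬ k ≤ cb + cs := fun h => hbr ⟨hSge3, h⟩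
          have hcs' := hcsS hSge3
          have hcsval : cnt d' (S-1) = cs := by
            have hc := hcnt' (S-1)
            have hne1 : S - 1 ≠ PySem.Int.floordiv S 2 := by rw [h2]; omega
            have hne2 : S - 1 ≠ PySem.Int.floordiv (S-1) 2 := by rw [hb2]; omega
            have hne3 : S - 1 ≠ S := by omega
            rw [if_neg hne1, if_neg hne2, if_neg hne3] at hc
            rw [hc, hcs']
            ring
          have hcs0 : 0 ≤ cs := by
            have := hpos (S-1); omega
          obtain ⟨e, a1, b1, heq2, hF0, hsuppe, hkeyse, hpose, hzS, hzS1⟩ :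
              ∃ e a1 b1,
                (solveLoopA (k.toNat - cb.toNat) d'
                    ((PySem.List.max? d'.keys (fun x => x)).getD 0)
                    (PySem.Int.floordiv S 2) (PySem.Int.floordiv (S-1) 2) =
                  solveLoopA (k.toNat - cb.toNat - cs.toNat) e
                    ((PySem.List.max? e.keys (fun x => x)).getD 0) a1 b1)
                ∧ (∀ x, cnt e x = cnt d' x
                    + cs * (if x = PySem.Int.floordiv (S-1) 2 then 1 else 0)
                    + cs * (if x = PySem.Int.floordiv (S-2) 2 then 1 else 0)
                    - cs * (if x = S-1 then 1 else 0))
                ∧ Supp e ∧ (∀ x ∈ e.keys, x ≤ S - 1) ∧ (∀ x, 0 ≤ cnt e x)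
                ∧ cnt e S = 0 ∧ cnt e (S-1) = 0 := by
            by_cases hcs1 : 1 ≤ cs
            · have hmax : (PySem.List.max? d'.keys (fun x => x)).getD 0 = S - 1 :=
                max_getD_eq _ _ ((hsupp' (S-1)).mpr (by omega)) hkeysS1
              rw [hmax]
              obtain ⟨e, heq2, hcnt2, hsuppe, hkeyse, hpose, hzero2⟩ :=
                passA cs.toNat d' (S-1) (k.toNat - cb.toNat)
                  (PySem.Int.floordiv S 2) (PySem.Int.floordiv (S-1) 2)
                  (by rw [hcsval]; omega) (by omega) hSge3 hsupp' hkeysS1 hpos'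
                  (by omega)
              have hrw : S - 1 - 1 = S - 2 := by ring
              rw [hrw] at heq2 hcnt2
              have hcast2 : (cs.toNat : Int) = cs := by omega
              rw [hcast2] at hcnt2
              refine ⟨e, _, _, heq2, hcnt2, hsuppe, hkeyse, hpose, ?_, hzero2⟩
              have hc := hcnt2 S
              have hne1 : S ≠ PySem.Int.floordiv (S-1) 2 := by rw [hb2]; omega
              have hne2 : S ≠ PySem.Int.floordiv (S-2) 2 := by rw [hc2]; omega
              have hne3 : S ≠ S - 1 := by omega
              rw [if_neg hne1, if_neg hne2, if_neg hne3] at hc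
              omega
            · have hcs00 : cs = 0 := by omega
              refine ⟨d', PySem.Int.floordiv S 2, PySem.Int.floordiv (S-1) 2,
                by rw [hcs00]; norm_num, ?_, hsupp', hkeysS1, hpos', hzero', by omega⟩
              intro x; rw [hcs00]; ring_nf
          rw [heq2]
          -- the combined multiset after the whole level is processed
          have hF : ∀ x, cnt e x = cnt d x
              + cb * (if x = S / 2 then 1 else 0)
              + cb * (if x = (S-1) / 2 then 1 else 0)
              + cs * (if x = (S-1) / 2 then 1 else 0)
              + cs * (if x = (S-2) / 2 then 1 else 0)
              - cb * (if x = S then 1 else 0)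
              - cs * (if x = S - 1 then 1 else 0) := by
            intro x
            have h1 := hcnt' x
            have h0 := hF0 x
            rw [h2, hb2] at h1
            rw [hb2, hc2] at h0
            split_ifs at h1 h0 ⊢ <;> omega
          rw [hmod, h2]
          have hfuel2 : k.toNat - cb.toNat - cs.toNat = (k - (cb + cs)).toNat := by omega
          rw [hfuel2]
          have hk' : 1 ≤ k - (cb + cs) := by omega
          by_cases hm1 : S % 2 = 1
          · rw [if_pos hm1]
            by_cases hS2b : 2 ≤ S / 2
            · -- recurse one level down with cb' = 2cb+cs, cs' = cs
              have hcbe : cnt e (S / 2) = 2*cb + cs := by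
                have hf := hF (S / 2)
                have hj := hjunk (S / 2) (by omega) (by omega) (by omega)
                split_ifs at hf <;> omega
              have hcse : 2 ≤ S / 2 - 1 → cnt e (S / 2 - 1) = cs := by
                intro h
                have hf := hF (S / 2 - 1)
                have hj := hjunk (S / 2 - 1) (by omega) (by omega) (by omega)
                split_ifs at hf <;> omega
              have hjunke : ∀ x, 2 ≤ x → x ≠ S / 2 → x ≠ S / 2 - 1 → cnt e x = 0 := by
                intro x hx hx1 hx2
                have hf := hF x
                have hdx : x = S ∨ x = S - 1 ∨ (x ≠ S ∧ x ≠ S - 1 ∧ cnt d x = 0) := by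
                  rcases eq_or_ne x S with h | h
                  · exact Or.inl h
                  · rcases eq_or_ne x (S-1) with h' | h'
                    · exact Or.inr (Or.inl h')
                    · exact Or.inr (Or.inr ⟨h, h', hjunk x hx h h'⟩)
                rcases hdx with rfl | rfl | ⟨hne1, hne2, h0⟩ <;> split_ifs at hf <;> omega
              have hkeyse2 : ∀ x ∈ e.keys, x ≤ S / 2 := by
                intro x hx
                have hx1 := hkeyse x hx
                have hx2 := (hsuppe x).mp hx
                by_cases hxle : x ≤ 1
                · omega
                · by_contra hcon
                  have := hjunke x (by omega) (by omega) (by omega)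
                  omega
              have hmaxe : (PySem.List.max? e.keys (fun x => x)).getD 0 = S / 2 :=
                max_getD_eq _ _ ((hsuppe (S / 2)).mpr (by omega)) hkeyse2
              rw [hmaxe]
              exact ih (S / 2) (2*cb + cs) cs (k - (cb + cs)) e a1 b1 (by omega) hS2b hk'
                ⟨hsuppe, hkeyse2, hpose, hcbe, by omega, hcse, hjunke⟩
            · -- S = 3: the next level is all ones and zeros, both sides give [0,0]
              have hS3 : S = 3 := by omega
              subst hS3
              have hone : 1 ≤ cnt e 1 := by
                have hf := hF 1
                have := hpos 1
                norm_num at hf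
                omega
              have hkeyse1 : ∀ x ∈ e.keys, x ≤ 1 := by
                intro x hx
                have hx1 := hkeyse x hx
                have hx2 := (hsuppe x).mp hx
                by_contra hcon
                have hx22 : x = 2 := by omega
                subst hx22
                have hf := hF 2
                norm_num at hf hcs'
                omega
              have hmaxe : (PySem.List.max? e.keys (fun x => x)).getD 0 = 1 :=
                max_getD_eq _ _ ((hsuppe 1).mpr (by omega)) hkeyse1
              have hbk := breakA ((k - (cb + cs)).toNat) e a1 b1 (by omega)
              rw [hmaxe, hbk]
              rw [show (3:Int)/2 = 1 from by decide, solveLoopB,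
                dif_neg (by norm_num : ¬ (2:Int) ≤ 1)]
          · rw [if_neg hm1]
            have hS2b : 2 ≤ S / 2 := by omega
            have hcbe : cnt e (S / 2) = cb := by
              have hf := hF (S / 2)
              have hj := hjunk (S / 2) (by omega) (by omega) (by omega)
              split_ifs at hf <;> omega
            have hcse : 2 ≤ S / 2 - 1 → cnt e (S / 2 - 1) = cb + 2*cs := by
              intro h
              have hf := hF (S / 2 - 1)
              have hj := hjunk (S / 2 - 1) (by omega) (by omega) (by omega)
              split_ifs at hf <;> omega
            have hjunke : ∀ x, 2 ≤ x → x ≠ S / 2 → x ≠ S / 2 - 1 → cnt e x = 0 := by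
              intro x hx hx1 hx2
              have hf := hF x
              have hdx : x = S ∨ x = S - 1 ∨ (x ≠ S ∧ x ≠ S - 1 ∧ cnt d x = 0) := by
                rcases eq_or_ne x S with h | h
                · exact Or.inl h
                · rcases eq_or_ne x (S-1) with h' | h'
                  · exact Or.inr (Or.inl h')
                  · exact Or.inr (Or.inr ⟨h, h', hjunk x hx h h'⟩)
              rcases hdx with rfl | rfl | ⟨hne1, hne2, h0⟩ <;> split_ifs at hf <;> omega
            have hkeyse2 : ∀ x ∈ e.keys, x ≤ S / 2 := by
              intro x hx
              have hx1 := hkeyse x hx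
              have hx2 := (hsuppe x).mp hx
              by_cases hxle : x ≤ 1
              · omega
              · by_contra hcon
                have := hjunke x (by omega) (by omega) (by omega)
                omega
            have hmaxe : (PySem.List.max? e.keys (fun x => x)).getD 0 = S / 2 :=
              max_getD_eq _ _ ((hsuppe (S / 2)).mpr (by omega)) hkeyse2
            rw [hmaxe]
            exact ih (S / 2) cb (cb + 2*cs) (k - (cb + cs)) e a1 b1 (by omega) hS2b hk'
              ⟨hsuppe, hkeyse2, hpose, hcbe, by omega, hcse, hjunke⟩
        · -- S = 2: every remaining pile is of size 1 or 0, both sides give [0,0]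
          simp only [if_neg hSge3]
          have hS2 : S = 2 := by omega
          subst hS2
          have hone : 1 ≤ cnt d' 1 := by
            have hf := hcnt' 1
            have := hpos 1
            rw [h2, hb2] at hf
            norm_num at hf
            omega
          have hmax : (PySem.List.max? d'.keys (fun x => x)).getD 0 = 1 :=
            max_getD_eq _ _ ((hsupp' 1).mpr (by omega)) hkeysS1
          have hbk := breakA (k.toNat - cb.toNat) d'
            (PySem.Int.floordiv 2 2) (PySem.Int.floordiv (2-1) 2) (by omega)
          rw [hmax, hbk, hmod]
          norm_num
          rw [solveLoopB, dif_neg (by norm_num : ¬ (2:Int) ≤ 1)]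

-- ===== VERDICT (by name: the statement is the Claim_ definition above) =====
set_option maxHeartbeats 1600000 in
theorem solve_spec : Claim_equal_solve := by
  unfold Claim_equal_solve
  intro n k _ hpre
  obtain ⟨hn, hk⟩ := hpre
  unfold Spec_solve solve solve_alt
  rcases eq_or_lt_of_le hn with h1 | h2
  · rw [← h1]
    rw [breakA k.toNat (PySem.Dict.counter [(1:Int)]) 0 0 (by omega)]
    rw [solveLoopB, dif_neg (by norm_num : ¬ (2:Int) ≤ 1)]
  · have hcnt0 : ∀ x, cnt (PySem.Dict.counter [n]) x = if x = n then 1 else 0 := by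
      intro x
      have hgd := PySem.Dict.getD_counter (xs := [n]) (v := x)
      simp only [List.count_cons, List.count_nil, beq_iff_eq] at hgd
      by_cases hx : x = n
      · subst hx
        simp only [cnt, hgd]
        simp
      · simp only [cnt, hgd]
        simp [hx, Ne.symm hx]
    have hmem : ∀ x, x ∈ (PySem.Dict.counter [n]).keys ↔ x = n := by
      intro x
      rw [PySem.Dict.keys_counter, PySem.Set.mem_ofList]
      simp
    apply mainA n.toNat n 1 0 k (PySem.Dict.counter [n]) 0 0 (le_refl _) (by omega) hk
    refine ⟨?_, ?_, ?_, ?_, le_refl 1, ?_, ?_⟩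
    · intro x
      rw [hmem x, hcnt0 x]
      by_cases hx : x = n <;> simp [hx]
    · intro x hx
      rw [hmem x] at hx
      omega
    · intro x
      rw [hcnt0 x]
      split_ifs <;> omega
    · rw [hcnt0 n, if_pos rfl]
    · intro h
      rw [hcnt0 (n-1), if_neg (by omega)]
    · intro x _ hx1 _
      rw [hcnt0 x, if_neg hx1]
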